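-- pv_equiv track=rewrite | github.com/Perledition/SFRT | src/feedme_service/ner/utils.py | extract_index_sequences
-- ===== SOURCE A (Python) =====
-- def extract_index_sequences(ix_list: list):
--     sequence_map = {0: list()}
--     current_sequence = 0
--
--     for ix in range(len(ix_list)):
--         try:
--             if ix_list[ix] + 1 == ix_list[ix + 1]:
--                 sequence_map[current_sequence].append(ix_list[ix])
--             else:
--                 sequence_map[current_sequence].append(ix_list[ix])
--                 current_sequence += 1
--                 sequence_map[current_sequence] = list()
--
--         except IndexError:
--             sequence_map[current_sequence].append(ix_list[ix])
--
--     return sequence_map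
-- ===== SOURCE B (Python) =====
-- def extract_index_sequences(ix_list: list):
--     # Compute the break positions between consecutive runs, then slice the
--     # list between consecutive breaks; key k maps to the k-th run.
--     n = len(ix_list)
--     breaks = [0] + [i + 1 for i in range(n - 1) if ix_list[i + 1] != ix_list[i] + 1] + [n]
--     return {k: ix_list[breaks[k]:breaks[k + 1]] for k in range(max(len(breaks) - 1, 1))}
-- ===== Notes on version B (the rewrite author's own statement) =====
-- stated objective: simpler
-- what changed: B replaces A's stateful index loop (try/except look-ahead, a dict grown under a run counter) by computing the list of run break positions with one comprehension and slicing ix_list between consecutive breaks.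
import Mathlib
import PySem

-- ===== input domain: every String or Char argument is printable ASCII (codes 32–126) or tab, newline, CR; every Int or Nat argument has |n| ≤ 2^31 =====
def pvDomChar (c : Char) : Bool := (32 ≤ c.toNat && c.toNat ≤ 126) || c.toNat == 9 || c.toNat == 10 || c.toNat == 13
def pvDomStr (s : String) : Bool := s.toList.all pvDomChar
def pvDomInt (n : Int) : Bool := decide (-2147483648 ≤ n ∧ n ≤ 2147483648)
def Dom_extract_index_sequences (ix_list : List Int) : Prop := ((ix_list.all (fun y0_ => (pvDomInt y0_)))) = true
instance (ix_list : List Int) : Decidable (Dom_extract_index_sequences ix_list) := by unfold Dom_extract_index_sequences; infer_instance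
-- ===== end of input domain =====

-- B computes the runs' break positions with comprehensions and slices between them,
-- instead of A's stateful index loop with try/except and a dict counter (objective: simpler).


-- ===== PORT A =====
-- the body of A's for-loop: state = (sequence_map, current_sequence); the try/except is
-- the pyGet? at ix+1 (none = IndexError); ix_list[ix] itself is always in range, so
-- pyGetD with default 0 is exact there; sequence_map[current].append is Dict.modify
-- (the key is always present, so the default [] is never used).
def stepA (ix_list : List Int) (st : PySem.Dict Int (List Int) × Int) (ix : Int) :
    PySem.Dict Int (List Int) × Int :=
  match PySem.List.pyGet? ix_list (ix + 1) with
  | some nxt =>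
      if PySem.List.pyGetD ix_list ix 0 + 1 = nxt then
        (st.1.modify st.2 [] (fun v => v ++ [PySem.List.pyGetD ix_list ix 0]), st.2)
      else
        ((st.1.modify st.2 [] (fun v => v ++ [PySem.List.pyGetD ix_list ix 0])).insert (st.2 + 1) [],
         st.2 + 1)
  | none =>
      (st.1.modify st.2 [] (fun v => v ++ [PySem.List.pyGetD ix_list ix 0]), st.2)

def extract_index_sequences (ix_list : List Int) : List (Int × List Int) :=
  ((PySem.List.pyRange 0 (ix_list.length : Int) 1).foldl (stepA ix_list)
    (PySem.Dict.ofList [((0 : Int), ([] : List Int))], 0)).1.items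

-- ===== PORT B =====
-- breaks = [0] + [i+1 for i in range(n-1) if ix_list[i+1] != ix_list[i]+1] + [n]
-- (the local variable of Source B as a helper); all indexing is in range, so pyGetD is exact.
def altBreaks (ix_list : List Int) : List Int :=
  [0] ++ ((PySem.List.pyRange 0 ((ix_list.length : Int) - 1) 1).filter
      (fun i => PySem.List.pyGetD ix_list (i + 1) 0 != PySem.List.pyGetD ix_list i 0 + 1)).map
      (fun i => i + 1)
    ++ [(ix_list.length : Int)]

-- the dict comprehension {k: ix_list[breaks[k]:breaks[k+1]] for k in range(max(len(breaks)-1, 1))}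
def extract_index_sequences_alt (ix_list : List Int) : List (Int × List Int) :=
  ((PySem.List.pyRange 0 (max (((altBreaks ix_list).length : Int) - 1) 1) 1).foldl
    (fun (d : PySem.Dict Int (List Int)) k =>
      d.insert k (PySem.List.slice ix_list (some (PySem.List.pyGetD (altBreaks ix_list) k 0))
        (some (PySem.List.pyGetD (altBreaks ix_list) (k + 1) 0))))
    PySem.Dict.empty).items

-- ===== PRECONDITION & SPEC =====
def Spec_extract_index_sequences (ix_list : List Int) (out : List (Int × List Int)) : Prop := out = extract_index_sequences_alt ix_list
instance (ix_list : List Int) (out : List (Int × List Int)) : Decidable (Spec_extract_index_sequences ix_list out) := by unfold Spec_extract_index_sequences; infer_instance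

-- ===== CLAIM (what is proved, stated in full; the proofs are below) =====
def Claim_equal_extract_index_sequences : Prop := ∀ (ix_list : List Int), Dom_extract_index_sequences ix_list → Spec_extract_index_sequences ix_list (extract_index_sequences ix_list)

-- ===== LEMMAS AND PROOFS =====

-- Both ports compute the canonical value: the list of maximal consecutive (+1) runs of
-- ix_list, keyed 0,1,2,… in order ([(0, [])] for the empty list).
def runs : List Int → List (List Int)
  | [] => []
  | [x] => [[x]]
  | x :: y :: t =>
      match runs (y :: t) with
      | r :: rs => if x + 1 = y then (x :: r) :: rs else [x] :: (r :: rs)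
      | [] => [[x]]

def enumRuns (j : Int) : List (List Int) → List (Int × List Int)
  | [] => []
  | r :: rs => (j, r) :: enumRuns (j + 1) rs

def finishRuns (cur : Int) (buf : List Int) : List (List Int) → List (Int × List Int)
  | [] => [(cur, buf)]
  | r :: rs => (cur, buf ++ r) :: enumRuns (cur + 1) rs

lemma runs_ne_nil : ∀ (l : List Int), l ≠ [] → runs l ≠ [] := by
  intro l hl
  match l with
  | [x] => simp [runs]
  | x :: y :: t =>
    unfold runs
    cases h : runs (y :: t) with
    | nil => simp
    | cons r rs => simp; split <;> simp

lemma runs_cons_cons (x y : Int) (t : List Int) (r : List Int) (rs : List (List Int))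
    (h : runs (y :: t) = r :: rs) :
    runs (x :: y :: t) = if x + 1 = y then (x :: r) :: rs else [x] :: (r :: rs) := by
  unfold runs; rw [h]

lemma dict_modify_last (done : List (Int × List Int)) (cur : Int) (buf : List Int)
    (f : List Int → List Int) (h : ∀ p ∈ done, p.1 ≠ cur) :
    (PySem.Dict.mk (done ++ [(cur, buf)])).modify cur [] f
      = PySem.Dict.mk (done ++ [(cur, f buf)]) := by
  have hf : List.find? (fun p => p.1 == cur) done = none :=
    List.find?_eq_none.mpr (by intro p hp; simpa using h p hp)
  have hc : (PySem.Dict.mk (done ++ [(cur, buf)])).contains cur = true := by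
    simp [PySem.Dict.contains]
  simp only [PySem.Dict.modify, PySem.Dict.getD, PySem.Dict.get?, PySem.Dict.insert, hc,
    if_true, List.find?_append, hf]
  simp only [List.find?_cons, beq_self_eq_true, Option.none_or, Option.map_some,
    Option.getD_some, List.map_append]
  have h1 : List.map (fun p => if (p.1 == cur) = true then (cur, f buf) else p) done = done := by
    calc List.map (fun p => if (p.1 == cur) = true then (cur, f buf) else p) done
        = List.map id done := List.map_congr_left (fun p hp => by simp [h p hp])
      _ = done := List.map_id done
  rw [h1]
  simp

lemma dict_insert_fresh (items : List (Int × List Int)) (k : Int) (v : List Int)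
    (h : ∀ p ∈ items, p.1 ≠ k) :
    (PySem.Dict.mk items).insert k v = PySem.Dict.mk (items ++ [(k, v)]) := by
  have hc : (PySem.Dict.mk items).contains k = false := by
    simp only [PySem.Dict.contains, List.any_eq_false]
    intro p hp; simpa using h p hp
  simp [PySem.Dict.insert, hc]

lemma loopA (l : List Int) : ∀ (k ix : Nat), l.length - ix = k → ix < l.length →
    ∀ (done : List (Int × List Int)) (cur : Int) (buf : List Int),
    (∀ p ∈ done, p.1 < cur) →
    (PySem.List.pyRange (ix : Int) (l.length : Int) 1).foldl (stepA l)
        (PySem.Dict.mk (done ++ [(cur, buf)]), cur)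
      = (PySem.Dict.mk (done ++ finishRuns cur buf (runs (l.drop ix))),
         cur + ((runs (l.drop ix)).length : Int) - 1) := by
  intro k
  induction k with
  | zero => intro ix hk hix; omega
  | succ k ih =>
    intro ix hk hix done cur buf hfresh
    have hcast : ((ix : Int)) < (l.length : Int) := by exact_mod_cast hix
    rw [PySem.List.pyRange_one_cons hcast, List.foldl_cons]
    have hdrop : l.drop ix = l[ix] :: l.drop (ix + 1) := List.drop_eq_getElem_cons hix
    have hgD : PySem.List.pyGetD l (ix : Int) 0 = l[ix] := by
      rw [PySem.List.pyGetD_natCast, List.getD_eq_getElem?_getD, List.getElem?_eq_getElem hix]; rfl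
    have hfresh' : ∀ p ∈ done, p.1 ≠ cur := fun p hp => ne_of_lt (hfresh p hp)
    have hcast1 : ((ix : Int) + 1) = (((ix + 1 : Nat)) : Int) := by push_cast; ring
    by_cases h2 : ix + 1 < l.length
    · have hg : PySem.List.pyGet? l ((ix : Int) + 1) = some l[ix + 1] := by
        rw [hcast1, PySem.List.pyGet?_natCast, List.getElem?_eq_getElem h2]
      have hdrop2 : l.drop (ix + 1) = l[ix + 1] :: l.drop (ix + 2) := List.drop_eq_getElem_cons h2
      obtain ⟨r, rs, hrr⟩ := List.exists_cons_of_ne_nil (runs_ne_nil (l.drop (ix + 1)) (by rw [hdrop2]; exact List.cons_ne_nil _ _))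
      have hruns : runs (l.drop ix)
          = if l[ix] + 1 = l[ix + 1] then (l[ix] :: r) :: rs else [l[ix]] :: (r :: rs) := by
        rw [hdrop, hdrop2]
        rw [hdrop2] at hrr
        exact runs_cons_cons _ _ _ _ _ hrr
      by_cases hc : l[ix] + 1 = l[ix + 1]
      · have hstep : stepA l (PySem.Dict.mk (done ++ [(cur, buf)]), cur) (ix : Int)
            = (PySem.Dict.mk (done ++ [(cur, buf ++ [l[ix]])]), cur) := by
          simp only [stepA, hg, hgD, hc, if_true]
          rw [dict_modify_last done cur buf _ hfresh']
        rw [hstep, hcast1, ih (ix + 1) (by omega) h2 done cur (buf ++ [l[ix]]) hfresh]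
        rw [hruns, if_pos hc, hrr]
        simp [finishRuns, List.append_assoc]
      · have hstep : stepA l (PySem.Dict.mk (done ++ [(cur, buf)]), cur) (ix : Int)
            = (PySem.Dict.mk ((done ++ [(cur, buf ++ [l[ix]])]) ++ [(cur + 1, [])]), cur + 1) := by
          simp only [stepA, hg, hgD, hc, if_false]
          rw [dict_modify_last done cur buf _ hfresh']
          rw [dict_insert_fresh]
          intro p hp
          rcases List.mem_append.mp hp with hp | hp
          · exact ne_of_lt (lt_trans (hfresh p hp) (by omega))
          · simp only [List.mem_singleton] at hp
            intro hcontra; rw [hp] at hcontra; simp at hcontra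
        rw [hstep, hcast1,
          ih (ix + 1) (by omega) h2 (done ++ [(cur, buf ++ [l[ix]])]) (cur + 1) [] ?_]
        · rw [hruns, if_neg hc, hrr]
          simp only [finishRuns, enumRuns, List.nil_append, List.append_assoc, List.cons_append,
            List.length_cons]
          congr 1
          push_cast; ring
        · intro p hp
          rcases List.mem_append.mp hp with hp | hp
          · exact lt_trans (hfresh p hp) (by omega)
          · simp only [List.mem_singleton] at hp
            rw [hp]; simp
    · have hlen : ix + 1 = l.length := by omega
      have hg : PySem.List.pyGet? l ((ix : Int) + 1) = none := by
        rw [hcast1, PySem.List.pyGet?_natCast, List.getElem?_eq_none_iff.mpr (by omega)]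
      have hstep : stepA l (PySem.Dict.mk (done ++ [(cur, buf)]), cur) (ix : Int)
          = (PySem.Dict.mk (done ++ [(cur, buf ++ [l[ix]])]), cur) := by
        simp only [stepA, hg, hgD]
        rw [dict_modify_last done cur buf _ hfresh']
      have hnil : l.drop (ix + 1) = [] := List.drop_eq_nil_of_le (by omega)
      rw [hstep, hcast1, PySem.List.pyRange_one_eq_nil (by exact_mod_cast (by omega : l.length ≤ ix + 1))]
      rw [List.foldl_nil, hdrop, hnil]
      simp [runs, finishRuns, enumRuns]

lemma A_eq_canon_aux (l : List Int) (hl : l ≠ []) :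
    ((PySem.List.pyRange 0 (l.length : Int) 1).foldl (stepA l)
      (PySem.Dict.ofList [((0 : Int), ([] : List Int))], 0)).1.items = enumRuns 0 (runs l) := by
  have h0 : 0 < l.length := List.length_pos_iff.mpr hl
  have hinit : (PySem.Dict.ofList [((0 : Int), ([] : List Int))])
      = PySem.Dict.mk ([] ++ [((0 : Int), ([] : List Int))]) := rfl
  have hmain := loopA l l.length 0 (by omega) h0 [] 0 [] (by simp)
  simp only [Nat.cast_zero] at hmain
  rw [hinit, hmain]
  obtain ⟨r, rs, hrr⟩ := List.exists_cons_of_ne_nil (runs_ne_nil l hl)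
  simp only [List.drop_zero, hrr, finishRuns, enumRuns, List.nil_append]

def cutsN : List Int → List Int
  | x :: y :: t => (if x + 1 = y then [] else [1]) ++ (cutsN (y :: t)).map (fun b => b + 1)
  | _ => []

def chunks (full : List Int) : List Int → Int → List (Int × List Int)
  | b0 :: b1 :: rest, j =>
      (j, PySem.List.slice full (some b0) (some b1)) :: chunks full (b1 :: rest) (j + 1)
  | _, _ => []

lemma cutsN_pos (l : List Int) : ∀ b ∈ cutsN l, 1 ≤ b := by
  induction l with
  | nil => simp [cutsN]
  | cons x tl ih =>
    cases tl with
    | nil => simp [cutsN]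
    | cons y t =>
      intro b hb
      unfold cutsN at hb
      rcases List.mem_append.mp hb with hb | hb
      · split at hb <;> simp_all
      · obtain ⟨c, hc, rfl⟩ := List.mem_map.mp hb
        have := ih c hc
        omega

lemma cuts_eq_nat (l : List Int) :
    List.map (fun (k : Nat) => ((k : Int) + 1))
        ((List.range (l.length - 1)).filter
          (fun k => l.getD (k + 1) 0 != l.getD k 0 + 1))
      = cutsN l := by
  induction l with
  | nil => simp [cutsN]
  | cons x tl ih =>
    cases tl with
    | nil => simp [cutsN]
    | cons y t =>
      rw [show (x :: y :: t).length - 1 = t.length + 1 from by simp,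
        List.range_succ_eq_map, List.filter_cons]
      have hcomp : ((fun k => (x :: y :: t).getD (k + 1) 0 != (x :: y :: t).getD k 0 + 1) ∘ Nat.succ)
          = (fun k => (y :: t).getD (k + 1) 0 != (y :: t).getD k 0 + 1) := by
        funext k
        simp
      rw [List.filter_map, hcomp]
      have htl : (y :: t).length - 1 = t.length := by simp
      rw [htl] at ih
      have hmm : List.map (fun (k : Nat) => ((k : Int) + 1))
          (List.map Nat.succ
            ((List.range t.length).filter
              (fun k => (y :: t).getD (k + 1) 0 != (y :: t).getD k 0 + 1)))
          = List.map (fun b => b + 1) (cutsN (y :: t)) := by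
        rw [← ih, List.map_map, List.map_map]
        apply List.map_congr_left
        intro k _
        simp only [Function.comp, Nat.succ_eq_add_one]
        push_cast
        ring
      by_cases hxy : x + 1 = y
      · have hc0 : ((x :: y :: t).getD (0 + 1) 0 != (x :: y :: t).getD 0 0 + 1) = false := by
          simp [List.getD]
          omega
        rw [hc0]
        simp only [Bool.false_eq_true, if_false]
        rw [hmm, show cutsN (x :: y :: t)
            = (if x + 1 = y then [] else [1]) ++ (cutsN (y :: t)).map (fun b => b + 1) from rfl,
          if_pos hxy, List.nil_append]
      · have hc0 : ((x :: y :: t).getD (0 + 1) 0 != (x :: y :: t).getD 0 0 + 1) = true := by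
          simp [List.getD]
          omega
        rw [hc0]
        simp only [if_true]
        rw [List.map_cons, hmm, show cutsN (x :: y :: t)
            = (if x + 1 = y then [] else [1]) ++ (cutsN (y :: t)).map (fun b => b + 1) from rfl,
          if_neg hxy, List.singleton_append]
        norm_num

lemma cuts_eq (l : List Int) :
    ((PySem.List.pyRange 0 ((l.length : Int) - 1) 1).filter
        (fun i => PySem.List.pyGetD l (i + 1) 0 != PySem.List.pyGetD l i 0 + 1)).map
        (fun i => i + 1)
      = cutsN l := by
  cases l with
  | nil =>
    rw [PySem.List.pyRange_one_eq_nil (by norm_num)]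
    simp [cutsN]
  | cons x tl =>
    rw [show ((x :: tl).length : Int) - 1 = (((x :: tl).length - 1 : Nat) : Int) from by
      simp]
    rw [PySem.List.pyRange_zero_natCast, List.filter_map]
    have hcomp : ((fun i => PySem.List.pyGetD (x :: tl) (i + 1) 0 != PySem.List.pyGetD (x :: tl) i 0 + 1)
          ∘ (fun (k : Nat) => (k : Int)))
        = (fun k => (x :: tl).getD (k + 1) 0 != (x :: tl).getD k 0 + 1) := by
      funext k
      simp only [Function.comp]
      rw [show ((k : Int) + 1) = ((k + 1 : Nat) : Int) from by push_cast; ring,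
        PySem.List.pyGetD_natCast, PySem.List.pyGetD_natCast]
    rw [hcomp, List.map_map, ← cuts_eq_nat (x :: tl)]
    apply List.map_congr_left
    intro k _
    simp [Function.comp]

lemma slice_cons_shift (x : Int) (tl : List Int) (a b : Int) (ha : 0 ≤ a) (hb : 0 ≤ b) :
    PySem.List.slice (x :: tl) (some (a + 1)) (some (b + 1))
      = PySem.List.slice tl (some a) (some b) := by
  rw [PySem.List.slice_toNat _ (by omega) (by omega), PySem.List.slice_toNat _ ha hb]
  rw [show (a + 1).toNat = a.toNat + 1 from by omega,
    show (b + 1).toNat - (a.toNat + 1) = b.toNat - a.toNat from by omega,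
    List.drop_succ_cons]

lemma chunks_shift (x : Int) (tl : List Int) : ∀ (bs : List Int) (j : Int),
    (∀ b ∈ bs, 0 ≤ b) →
    chunks (x :: tl) (bs.map (fun b => b + 1)) j = chunks tl bs j := by
  intro bs
  induction bs with
  | nil => intro j _; rfl
  | cons b0 rest ih =>
    intro j h
    cases rest with
    | nil => rfl
    | cons b1 rest' =>
      simp only [List.map_cons]
      unfold chunks
      rw [slice_cons_shift x tl b0 b1 (h b0 (by simp)) (h b1 (by simp))]
      have htail := ih (j + 1) (fun b hb => h b (by simp [hb]))
      simp only [List.map_cons] at htail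
      rw [htail]

lemma chunks_eq_enumRuns : ∀ (l : List Int), l ≠ [] → ∀ (j : Int),
    chunks l (0 :: (cutsN l ++ [(l.length : Int)])) j = enumRuns j (runs l) := by
  intro l
  induction l with
  | nil => intro h; exact absurd rfl h
  | cons x tl ih =>
    intro _ j
    cases tl with
    | nil =>
      have h1 : PySem.List.slice [x] (some 0) (some 1) = [x] := by
        rw [PySem.List.slice_toNat _ (by norm_num) (by norm_num)]
        rfl
      simp [cutsN, chunks, runs, enumRuns, h1]
    | cons y t =>
      have htl : (y :: t) ≠ [] := List.cons_ne_nil _ _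
      obtain ⟨r, rs, hrr⟩ := List.exists_cons_of_ne_nil (runs_ne_nil _ htl)
      obtain ⟨c1, rest, hcr⟩ := List.exists_cons_of_ne_nil
        (l := cutsN (y :: t) ++ [(((y :: t).length : Int))]) (by simp)
      have hnn : ∀ b ∈ c1 :: rest, 0 ≤ b := by
        intro b hb
        rw [← hcr] at hb
        rcases List.mem_append.mp hb with hb | hb
        · have := cutsN_pos (y :: t) b hb; omega
        · simp at hb; rw [hb]; positivity
      have hlen : ((x :: y :: t).length : Int) = (((y :: t).length : Int)) + 1 := by
        simp
      by_cases hxy : x + 1 = y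
      · have hbreaks : cutsN (x :: y :: t) ++ [((x :: y :: t).length : Int)]
            = (c1 + 1) :: (rest.map (fun b => b + 1)) := by
          have h' := congrArg (List.map (fun (b : Int) => b + 1)) hcr
          simp only [List.map_append, List.map_cons, List.map_nil] at h'
          simp only [cutsN, if_pos hxy, List.nil_append, hlen]
          rw [← h']
        have hIH := ih htl j
        rw [hcr, hrr] at hIH
        unfold chunks at hIH
        have hslice : PySem.List.slice (y :: t) (some 0) (some c1) = r := by
          have := congrArg (fun z => z.headI.2) hIH
          simpa [enumRuns] using this
        have hrest : chunks (y :: t) (c1 :: rest) (j + 1) = enumRuns (j + 1) rs := by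
          have := congrArg List.tail hIH
          simpa [enumRuns] using this
        rw [hbreaks]
        unfold chunks
        rw [show (c1 + 1) :: List.map (fun b => b + 1) rest
              = List.map (fun b => b + 1) (c1 :: rest) from rfl,
          chunks_shift x (y :: t) (c1 :: rest) (j + 1) hnn, hrest]
        have hc1 : (0 : Int) ≤ c1 := hnn c1 (by simp)
        have hsl : PySem.List.slice (x :: y :: t) (some 0) (some (c1 + 1)) = x :: r := by
          rw [PySem.List.slice_toNat _ (by norm_num) (by omega),
            show (c1 + 1).toNat - (0 : Int).toNat = c1.toNat + 1 from by omega]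
          simp only [Int.toNat_zero, List.drop_zero, List.take_succ_cons]
          rw [PySem.List.slice_toNat _ le_rfl hc1,
            show c1.toNat - (0 : Int).toNat = c1.toNat from by omega] at hslice
          simp only [Int.toNat_zero, List.drop_zero] at hslice
          rw [hslice]
        rw [hsl, runs_cons_cons x y t r rs hrr, if_pos hxy]
        simp [enumRuns]
      · have hbreaks : cutsN (x :: y :: t) ++ [((x :: y :: t).length : Int)]
            = ((0 : Int) + 1) :: ((cutsN (y :: t) ++ [(((y :: t).length : Int))]).map (fun b => b + 1)) := by
          simp [cutsN, hxy]
        have hnn0 : ∀ b ∈ (0 : Int) :: (cutsN (y :: t) ++ [(((y :: t).length : Int))]), 0 ≤ b := by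
          intro b hb
          rcases List.mem_cons.mp hb with hb | hb
          · omega
          · rw [hcr] at hb; exact hnn b hb
        rw [hbreaks]
        unfold chunks
        rw [show ((0 : Int) + 1) :: ((cutsN (y :: t) ++ [(((y :: t).length : Int))]).map (fun b => b + 1))
              = ((0 : Int) :: (cutsN (y :: t) ++ [(((y :: t).length : Int))])).map (fun b => b + 1) from rfl,
          chunks_shift x (y :: t) _ (j + 1) hnn0, ih htl (j + 1)]
        have hsl : PySem.List.slice (x :: y :: t) (some 0) (some ((0 : Int) + 1)) = [x] := by
          rw [PySem.List.slice_toNat _ (by norm_num) (by norm_num)]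
          norm_num
        rw [hsl, runs_cons_cons x y t r rs hrr, if_neg hxy, hrr]
        simp [enumRuns]

lemma map_range_eq_chunks (full : List Int) : ∀ (bs : List Int) (j : Int),
    List.map (fun (k : Nat) => (j + (k : Int),
        PySem.List.slice full (some (bs.getD k 0)) (some (bs.getD (k + 1) 0))))
      (List.range (bs.length - 1))
      = chunks full bs j := by
  intro bs
  induction bs with
  | nil => intro j; rfl
  | cons b0 rest ih =>
    intro j
    cases rest with
    | nil => simp [chunks]
    | cons b1 rest' =>
      rw [show (b0 :: b1 :: rest').length - 1 = rest'.length + 1 from by simp,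
        List.range_succ_eq_map, List.map_cons, List.map_map]
      rw [show chunks full (b0 :: b1 :: rest') j
          = (j, PySem.List.slice full (some b0) (some b1)) :: chunks full (b1 :: rest') (j + 1) from rfl]
      congr 1
      · norm_num
      · rw [← ih (j + 1)]
        apply List.map_congr_left
        intro k _
        simp only [Function.comp, Nat.succ_eq_add_one, List.getD_cons_succ, Prod.mk.injEq]
        exact ⟨by push_cast; ring, by trivial⟩

lemma altBreaks_eq (l : List Int) :
    altBreaks l = 0 :: (cutsN l ++ [(l.length : Int)]) := by
  unfold altBreaks
  rw [cuts_eq]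
  simp

lemma A_eq_canon (l : List Int) :
    extract_index_sequences l
      = if l = [] then [((0 : Int), ([] : List Int))] else enumRuns 0 (runs l) := by
  by_cases hl : l = []
  · subst hl; rfl
  · rw [if_neg hl]
    exact A_eq_canon_aux l hl

lemma B_eq_canon (l : List Int) :
    extract_index_sequences_alt l
      = if l = [] then [((0 : Int), ([] : List Int))] else enumRuns 0 (runs l) := by
  by_cases hl : l = []
  · subst hl; rfl
  · rw [if_neg hl]
    unfold extract_index_sequences_alt
    have h2 : 2 ≤ (altBreaks l).length := by
      rw [altBreaks_eq]; simp
    rw [show max (((altBreaks l).length : Int) - 1) 1 = (((altBreaks l).length - 1 : Nat) : Int)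
      from by omega]
    have hfold : ((PySem.List.pyRange 0 ((((altBreaks l).length - 1 : Nat) : Int)) 1).foldl
        (fun (d : PySem.Dict Int (List Int)) k =>
          d.insert k (PySem.List.slice l (some (PySem.List.pyGetD (altBreaks l) k 0))
            (some (PySem.List.pyGetD (altBreaks l) (k + 1) 0))))
        PySem.Dict.empty).items
        = [] ++ (PySem.List.pyRange 0 ((((altBreaks l).length - 1 : Nat) : Int)) 1).map
            (fun a => (a, PySem.List.slice l (some (PySem.List.pyGetD (altBreaks l) a 0))
              (some (PySem.List.pyGetD (altBreaks l) (a + 1) 0)))) :=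
      PySem.Dict.items_foldl_insert_fresh
        (PySem.List.pyRange 0 ((((altBreaks l).length - 1 : Nat) : Int)) 1)
        (fun a => a)
        (fun a => PySem.List.slice l (some (PySem.List.pyGetD (altBreaks l) a 0))
          (some (PySem.List.pyGetD (altBreaks l) (a + 1) 0)))
        PySem.Dict.empty
        (fun a _ => rfl)
        (by simpa using PySem.List.nodup_pyRange_one 0 ((((altBreaks l).length - 1 : Nat) : Int)))
    rw [hfold, List.nil_append]
    rw [PySem.List.pyRange_zero_natCast, List.map_map]
    have hmap : List.map ((fun a => (a, PySem.List.slice l (some (PySem.List.pyGetD (altBreaks l) a 0))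
          (some (PySem.List.pyGetD (altBreaks l) (a + 1) 0)))) ∘ (fun (k : Nat) => (k : Int)))
        (List.range ((altBreaks l).length - 1))
        = List.map (fun (k : Nat) => ((0 : Int) + (k : Int),
            PySem.List.slice l (some ((altBreaks l).getD k 0)) (some ((altBreaks l).getD (k + 1) 0))))
          (List.range ((altBreaks l).length - 1)) := by
      apply List.map_congr_left
      intro k _
      simp only [Function.comp, Prod.mk.injEq]
      constructor
      · ring
      · rw [show ((k : Int) + 1) = ((k + 1 : Nat) : Int) from by push_cast; ring,
          PySem.List.pyGetD_natCast, PySem.List.pyGetD_natCast]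
    rw [hmap, map_range_eq_chunks l (altBreaks l) 0, altBreaks_eq,
      chunks_eq_enumRuns l hl 0]

-- ===== VERDICT (by name: the statement is the Claim_ definition above) =====
theorem extract_index_sequences_spec : Claim_equal_extract_index_sequences := by
  intro l _
  unfold Spec_extract_index_sequences
  rw [A_eq_canon, B_eq_canon]
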